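-- pv_equiv track=rewrite | github.com/hcnimi/dark-factory | dark_factory/context_engineering.py | build_reverse_dependency_map
-- ===== SOURCE A (Python) =====
-- def build_reverse_dependency_map(
--     import_graph: dict[str, list[str]],
-- ) -> dict[str, list[str]]:
--     """Build reverse lookup: for each file, which files import it.
--
--     Used to generate 'Used by:' annotations in symbol context rendering.
--     """
--     reverse: dict[str, list[str]] = {}
--     for source_file, imports in import_graph.items():
--         for imported_file in imports:
--             if imported_file not in reverse:
--                 reverse[imported_file] = []
--             if source_file not in reverse[imported_file]:
--                 reverse[imported_file].append(source_file)
--     # Sort each list for deterministic output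
--     for key in reverse:
--         reverse[key].sort()
--     return reverse
-- ===== SOURCE B (Python) =====
-- def build_reverse_dependency_map(
--     import_graph: dict[str, list[str]],
-- ) -> dict[str, list[str]]:
--     """Key-major rebuild: distinct imported files in first-encounter order,
--     each mapped to the sorted set of source files whose imports contain it."""
--     keys = dict.fromkeys(i for imports in import_graph.values() for i in imports)
--     return {
--         k: sorted({s for s, imports in import_graph.items() if k in imports})
--         for k in keys
--     }
-- ===== Notes on version B (the rewrite author's own statement) =====
-- stated objective: alternative
-- what changed: A builds the reverse dict source-major with per-element list-membership dedup and a final per-key in-place sort; B instead flattens all imports once to get the distinct keys in first-encounter order, then produces each entry key-major as one sorted set comprehension over the graph.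
import Mathlib
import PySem

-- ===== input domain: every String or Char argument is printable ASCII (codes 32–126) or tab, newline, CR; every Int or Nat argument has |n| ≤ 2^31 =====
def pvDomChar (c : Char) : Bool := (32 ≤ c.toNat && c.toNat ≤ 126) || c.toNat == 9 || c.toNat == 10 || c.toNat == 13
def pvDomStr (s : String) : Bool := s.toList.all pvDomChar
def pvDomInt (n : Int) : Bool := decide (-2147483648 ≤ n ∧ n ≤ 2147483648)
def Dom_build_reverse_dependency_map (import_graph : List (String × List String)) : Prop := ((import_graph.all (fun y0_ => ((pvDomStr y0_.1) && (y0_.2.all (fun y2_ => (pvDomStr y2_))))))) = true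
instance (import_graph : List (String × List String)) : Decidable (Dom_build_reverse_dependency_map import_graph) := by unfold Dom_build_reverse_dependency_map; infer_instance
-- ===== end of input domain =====

-- B inverts the graph key-major (distinct imported files first, then one sorted set comprehension per key)
-- instead of A's source-major dict building with per-element list-membership dedup; objective: alternative, not faster.

-- ===== PORT A =====
-- body of A's inner loop: one imported_file processed against the dict `reverse`
def stepA (source_file : String) (d : PySem.Dict String (List String)) (imported_file : String) : PySem.Dict String (List String) :=
  let d1 := if d.contains imported_file then d else d.insert imported_file ([] : List String)
  let cur := d1.getD imported_file []   -- reverse[imported_file]; the key is present thanks to the guard above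
  if source_file ∈ cur then d1 else d1.insert imported_file (cur ++ [source_file])

def build_reverse_dependency_map (import_graph : List (String × List String)) : List (String × List String) :=
  let reverse := import_graph.foldl (fun d p => p.2.foldl (stepA p.1) d) PySem.Dict.empty
  -- for key in reverse: reverse[key].sort()
  let reverse2 := reverse.keys.foldl (fun d k => d.insert k (PySem.List.sorted (d.getD k []) (fun x => x) false)) reverse
  reverse2.items

-- ===== PORT B =====
def build_reverse_dependency_map_alt (import_graph : List (String × List String)) : List (String × List String) :=
  let all_imports := import_graph.flatMap (fun p => p.2)
  let keys := PySem.List.dedup all_imports      -- dict.fromkeys(...)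
  keys.map (fun k => (k, PySem.List.sorted (PySem.Set.ofList ((import_graph.filter (fun p => k ∈ p.2)).map (fun p => p.1))) (fun x => x) false))

-- ===== PRECONDITION & SPEC =====
def Spec_build_reverse_dependency_map (import_graph : List (String × List String)) (out : List (String × List String)) : Prop := out = build_reverse_dependency_map_alt import_graph
instance (import_graph : List (String × List String)) (out : List (String × List String)) : Decidable (Spec_build_reverse_dependency_map import_graph out) := by unfold Spec_build_reverse_dependency_map; infer_instance

-- ===== CLAIM (what is proved, stated in full; the proofs are below) =====
def Claim_equal_build_reverse_dependency_map : Prop := ∀ (import_graph : List (String × List String)), Dom_build_reverse_dependency_map import_graph → Spec_build_reverse_dependency_map import_graph (build_reverse_dependency_map import_graph)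

-- ===== LEMMAS AND PROOFS =====

-- the edge list (imported_file, source_file) of the graph, in A's traversal order
def edgesOf (g : List (String × List String)) : List (String × String) :=
  g.flatMap (fun p => p.2.map (fun i => (i, p.1)))

-- sources of the edges with key k, in order, with multiplicity
def srcsOf (k : String) (e : List (String × String)) : List String :=
  (e.filter (fun q => q.1 == k)).map (fun q => q.2)

-- the dict A's double loop builds over edge list e, as an items list
def revOf (e : List (String × String)) : List (String × List String) :=
  (PySem.List.dedup (e.map (fun q => q.1))).map (fun k => (k, PySem.List.dedup (srcsOf k e)))

lemma foldl_graph_eq (g : List (String × List String)) (d0 : PySem.Dict String (List String)) :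
    g.foldl (fun d p => p.2.foldl (stepA p.1) d) d0
      = (edgesOf g).foldl (fun d q => stepA q.2 d q.1) d0 := by
  induction g generalizing d0 with
  | nil => rfl
  | cons p g ih =>
    simp only [List.foldl_cons, edgesOf, List.flatMap_cons, List.foldl_append, List.foldl_map]
    exact ih _

lemma ofList_snoc (xs : List String) (x : String) :
    PySem.Set.ofList (xs ++ [x])
      = if x ∈ xs then PySem.Set.ofList xs else PySem.Set.ofList xs ++ [x] := by
  rw [PySem.Set.ofList_eq_foldl, PySem.Set.ofList_eq_foldl, List.foldl_append]
  simp only [List.foldl_cons, List.foldl_nil]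
  have hmem : x ∈ List.foldl PySem.Set.add [] xs ↔ x ∈ xs := by
    rw [← PySem.Set.ofList_eq_foldl]; exact PySem.Set.mem_ofList xs x
  by_cases h : x ∈ xs
  · simp [PySem.Set.add, PySem.Set.contains, hmem, h]
  · simp [PySem.Set.add, PySem.Set.contains, hmem, h]

lemma dedup_snoc (xs : List String) (x : String) :
    PySem.List.dedup (xs ++ [x])
      = if x ∈ xs then PySem.List.dedup xs else PySem.List.dedup xs ++ [x] := by
  rw [PySem.List.dedup_eq_ofList, PySem.List.dedup_eq_ofList, ofList_snoc]
lemma contains_mkmap (K : List String) (V : String → List String) (i : String) :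
    (PySem.Dict.mk (K.map (fun k => (k, V k)))).contains i = decide (i ∈ K) := by
  by_cases h : i ∈ K
  · simp only [PySem.Dict.contains, List.any_map, h, decide_true]
    rw [List.any_eq_true]
    exact ⟨i, h, by simp⟩
  · simp only [h, decide_false]
    rw [PySem.Dict.contains, List.any_map, List.any_eq_false]
    intro x hx
    simp only [Function.comp, beq_iff_eq]
    intro hxi; exact h (hxi ▸ hx)
lemma getD_mkmap (K : List String) (V : String → List String) (i : String)
    (hK : K.Nodup) (hi : i ∈ K) :
    (PySem.Dict.mk (K.map (fun k => (k, V k)))).getD i [] = V i := by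
  apply PySem.Dict.getD_of_mem_items
  · exact List.mem_map.mpr ⟨i, hi, rfl⟩
  · simpa [PySem.Dict.keys, List.map_map, Function.comp_def] using hK
lemma insert_mkmap (K : List String) (V : String → List String) (i : String)
    (hi : i ∈ K) (v : List String) :
    (PySem.Dict.mk (K.map (fun k => (k, V k)))).insert i v
      = PySem.Dict.mk (K.map (fun k => (k, if k = i then v else V k))) := by
  have hc : (PySem.Dict.mk (K.map (fun k => (k, V k)))).contains i = true := by
    rw [contains_mkmap]; simpa using hi
  apply PySem.Dict.ext
  rw [PySem.Dict.items_insert_of_contains _ _ hc]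
  simp only [List.map_map]
  apply List.map_congr_left
  intro k _
  by_cases hk : k = i
  · subst hk; simp
  · simp [Function.comp, hk]
lemma insert_mkmap_fresh (K : List String) (V : String → List String) (i : String)
    (hi : i ∉ K) (v : List String) :
    (PySem.Dict.mk (K.map (fun k => (k, V k)))).insert i v
      = PySem.Dict.mk (K.map (fun k => (k, V k)) ++ [(i, v)]) := by
  have hc : (PySem.Dict.mk (K.map (fun k => (k, V k)))).contains i = false := by
    rw [contains_mkmap]; simpa using hi
  apply PySem.Dict.ext
  rw [PySem.Dict.items_insert_of_not_contains _ _ hc]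
lemma srcs_of_not_mem (i : String) (e : List (String × String)) (h : i ∉ e.map (fun q => q.1)) :
    srcsOf i e = [] := by
  have h2 : e.filter (fun q => q.1 == i) = [] := by
    rw [List.filter_eq_nil_iff]
    intro q hq
    simp only [beq_iff_eq]
    intro hqi
    exact h (List.mem_map.mpr ⟨q, hq, hqi⟩)
  simp [srcsOf, h2]
lemma srcs_snoc (k i s : String) (e : List (String × String)) :
    srcsOf k (e ++ [(i, s)]) = srcsOf k e ++ (if i = k then [s] else []) := by
  by_cases h : i = k
  · simp [srcsOf, List.filter_append, h]
  · simp [srcsOf, List.filter_append, h]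

lemma stepA_rev (e : List (String × String)) (i s : String) :
    stepA s (PySem.Dict.mk (revOf e)) i = PySem.Dict.mk (revOf (e ++ [(i, s)])) := by
  have hK : (PySem.List.dedup (e.map (fun q => q.1))).Nodup := PySem.List.nodup_dedup _
  have hrev : revOf e
      = (PySem.List.dedup (e.map (fun q => q.1))).map (fun k => (k, PySem.List.dedup (srcsOf k e))) := rfl
  have hmapfst : (e ++ [(i, s)]).map (fun q => q.1) = e.map (fun q => q.1) ++ [i] := by
    simp
  by_cases hi : i ∈ e.map (fun q => q.1)
  · -- imported_file already a key
    have hc : (PySem.Dict.mk (revOf e)).contains i = true := by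
      rw [hrev, contains_mkmap]; simp [hi]
    have hiK : i ∈ PySem.List.dedup (e.map (fun q => q.1)) := by
      simpa [PySem.List.mem_dedup] using hi
    have hg : (PySem.Dict.mk (revOf e)).getD i [] = PySem.List.dedup (srcsOf i e) := by
      rw [hrev]; exact getD_mkmap _ _ i hK hiK
    have hkeys : PySem.List.dedup ((e ++ [(i, s)]).map (fun q => q.1))
        = PySem.List.dedup (e.map (fun q => q.1)) := by
      rw [hmapfst, dedup_snoc, if_pos hi]
    by_cases hs : s ∈ srcsOf i e
    · have hsmem : s ∈ PySem.List.dedup (srcsOf i e) := by simpa [PySem.List.mem_dedup] using hs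
      have : stepA s (PySem.Dict.mk (revOf e)) i = PySem.Dict.mk (revOf e) := by
        simp only [stepA, hc, if_true, hg]
        rw [if_pos hsmem]
      rw [this]
      congr 1
      rw [hrev, revOf, hkeys]
      apply List.map_congr_left
      intro k hk
      by_cases hki : k = i
      · subst hki
        simp [srcs_snoc, ofList_snoc, hs]
      · have hik : ¬ i = k := fun h => hki h.symm
        simp [srcs_snoc, hik]
    · have hsmem : s ∉ PySem.List.dedup (srcsOf i e) := by simpa [PySem.List.mem_dedup] using hs
      have : stepA s (PySem.Dict.mk (revOf e)) i
          = (PySem.Dict.mk (revOf e)).insert i (PySem.List.dedup (srcsOf i e) ++ [s]) := by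
        simp only [stepA, hc, if_true, hg]
        rw [if_neg hsmem]
      rw [this, hrev, insert_mkmap _ _ i hiK, revOf, hkeys]
      congr 1
      apply List.map_congr_left
      intro k hk
      by_cases hki : k = i
      · subst hki
        simp [srcs_snoc, ofList_snoc, hs]
      · have hik : ¬ i = k := fun h => hki h.symm
        simp [srcs_snoc, hik, hki]
  · -- fresh imported_file
    have hiK : i ∉ PySem.List.dedup (e.map (fun q => q.1)) := by
      simpa [PySem.List.mem_dedup] using hi
    have hc : (PySem.Dict.mk (revOf e)).contains i = false := by
      rw [hrev, contains_mkmap]; simpa using hi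
    have hins : (PySem.Dict.mk (revOf e)).insert i ([] : List String)
        = PySem.Dict.mk ((PySem.List.dedup (e.map (fun q => q.1)) ++ [i]).map
            (fun k => (k, if k = i then [] else PySem.List.dedup (srcsOf k e)))) := by
      rw [hrev, insert_mkmap_fresh _ _ i hiK]
      congr 1
      rw [List.map_append]
      congr 1
      · apply List.map_congr_left
        intro k hk
        have hne : ¬ k = i := fun h => hiK (h ▸ hk)
        rw [if_neg hne]
      · simp
    have hnodup2 : (PySem.List.dedup (e.map (fun q => q.1)) ++ [i]).Nodup := by
      refine List.Nodup.append hK (List.nodup_singleton _) ?_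
      intro a ha hb
      rw [List.mem_singleton] at hb
      exact hiK (hb ▸ ha)
    have hg : ((PySem.Dict.mk (revOf e)).insert i ([] : List String)).getD i [] = ([] : List String) := by
      rw [hins]
      have := getD_mkmap (PySem.List.dedup (e.map (fun q => q.1)) ++ [i])
        (fun k => if k = i then [] else PySem.List.dedup (srcsOf k e)) i hnodup2 (by simp)
      simpa using this
    have hstep : stepA s (PySem.Dict.mk (revOf e)) i
        = ((PySem.Dict.mk (revOf e)).insert i ([] : List String)).insert i ([] ++ [s]) := by
      simp only [stepA, hc, Bool.false_eq_true, if_false, hg]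
      simp
    rw [hstep, hins, insert_mkmap _ _ i (by simp), revOf, hmapfst, dedup_snoc, if_neg hi]
    congr 1
    apply List.map_congr_left
    intro k hk
    by_cases hki : k = i
    · subst hki
      simp only [srcs_snoc, srcs_of_not_mem _ _ hi, List.nil_append]
      exact congrArg _ (PySem.Set.ofList_eq_self_of_nodup _ (by simp)).symm
    · have hik : ¬ i = k := fun h => hki h.symm
      simp [srcs_snoc, hik, hki]


lemma fold_edges_eq (e : List (String × String)) :
    e.foldl (fun d q => stepA q.2 d q.1) PySem.Dict.empty = PySem.Dict.mk (revOf e) := by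
  induction e using List.reverseRecOn with
  | nil => rfl
  | append_singleton e q ih =>
    obtain ⟨i, s⟩ := q
    rw [List.foldl_append, List.foldl_cons, List.foldl_nil, ih]
    exact stepA_rev e i s

lemma sortloop (ks : List String) :
    ∀ (K : List String) (V : String → List String), K.Nodup → ks.Nodup → (∀ k ∈ ks, k ∈ K) →
      ks.foldl (fun d k => d.insert k (PySem.List.sorted (d.getD k []) (fun x => x) false))
          (PySem.Dict.mk (K.map (fun k => (k, V k))))
        = PySem.Dict.mk (K.map (fun k => (k, if k ∈ ks then PySem.List.sorted (V k) (fun x => x) false else V k))) := by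
  induction ks with
  | nil => intro K V _ _ _; simp
  | cons k ks ih =>
    intro K V hK hks hsub
    rw [List.foldl_cons]
    have hkK : k ∈ K := hsub k List.mem_cons_self
    rw [getD_mkmap K V k hK hkK, insert_mkmap K V k hkK]
    rw [ih K (fun x => if x = k then PySem.List.sorted (V k) (fun x => x) false else V x) hK
      (List.nodup_cons.mp hks).2 (fun x hx => hsub x (List.mem_cons_of_mem _ hx))]
    congr 1
    apply List.map_congr_left
    intro x _
    by_cases hx : x = k
    · subst hx
      have hnk : x ∉ ks := (List.nodup_cons.mp hks).1
      simp [hnk]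
    · simp [hx]

lemma edges_map_fst (g : List (String × List String)) :
    (edgesOf g).map (fun q => q.1) = g.flatMap (fun p => p.2) := by
  simp [edgesOf, List.map_flatMap, List.map_map, Function.comp_def]

lemma filter_map_pair (l : List String) (s k : String) :
    ((l.map (fun i => (i, s))).filter (fun q => q.1 == k)).map (fun q => q.2)
      = List.replicate (l.count k) s := by
  induction l with
  | nil => rfl
  | cons a l ih =>
    by_cases h : a = k
    · subst h; simp [ih, List.replicate_succ]
    · simp [h, ih]

lemma set_add_idem (s : PySem.Set String) (x : String) :
    PySem.Set.add (PySem.Set.add s x) x = PySem.Set.add s x := by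
  by_cases hm : x ∈ s <;> simp [PySem.Set.add, PySem.Set.contains, hm]

lemma foldl_add_replicate (x : String) : ∀ (n : Nat), n ≠ 0 → ∀ s : PySem.Set String,
    (List.replicate n x).foldl PySem.Set.add s = PySem.Set.add s x
  | 0, h, _ => absurd rfl h
  | n+1, _, s => by
    rw [List.replicate_succ, List.foldl_cons]
    cases n with
    | zero => rfl
    | succ m => rw [foldl_add_replicate x (m+1) (Nat.succ_ne_zero m) (PySem.Set.add s x), set_add_idem]

lemma srcs_edges (k : String) (g : List (String × List String)) :
    ∀ s : PySem.Set String,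
      (srcsOf k (edgesOf g)).foldl PySem.Set.add s
        = ((g.filter (fun p => k ∈ p.2)).map (fun p => p.1)).foldl PySem.Set.add s := by
  induction g with
  | nil => intro s; rfl
  | cons p g ih =>
    intro s
    have hsplit : srcsOf k (edgesOf (p :: g))
        = List.replicate (p.2.count k) p.1 ++ srcsOf k (edgesOf g) := by
      simp [srcsOf, edgesOf, List.filter_append, List.map_append, filter_map_pair]
    rw [hsplit, List.foldl_append]
    by_cases h : k ∈ p.2
    · have hcnt : p.2.count k ≠ 0 := by
        simpa [List.count_eq_zero] using h
      rw [foldl_add_replicate _ _ hcnt]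
      simp only [List.filter_cons, h, decide_true]
      exact ih _
    · have hcnt : p.2.count k = 0 := by simpa [List.count_eq_zero] using h
      rw [hcnt]
      simp only [List.replicate_zero, List.foldl_nil, List.filter_cons, h, decide_false]
      exact ih _

lemma dedup_srcs_eq (k : String) (g : List (String × List String)) :
    PySem.List.dedup (srcsOf k (edgesOf g))
      = PySem.Set.ofList ((g.filter (fun p => k ∈ p.2)).map (fun p => p.1)) := by
  rw [PySem.List.dedup_eq_ofList, PySem.Set.ofList_eq_foldl, PySem.Set.ofList_eq_foldl]
  exact srcs_edges k g []

lemma main_eq (g : List (String × List String)) :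
    build_reverse_dependency_map g = build_reverse_dependency_map_alt g := by
  unfold build_reverse_dependency_map build_reverse_dependency_map_alt
  dsimp only
  rw [foldl_graph_eq, fold_edges_eq]
  have hkeys : (PySem.Dict.mk (revOf (edgesOf g))).keys
      = PySem.List.dedup ((edgesOf g).map (fun q => q.1)) := by
    simp [PySem.Dict.keys, revOf, List.map_map, Function.comp_def]
  rw [hkeys]
  rw [show revOf (edgesOf g)
      = (PySem.List.dedup ((edgesOf g).map (fun q => q.1))).map
          (fun k => (k, PySem.List.dedup (srcsOf k (edgesOf g)))) from rfl]
  rw [sortloop _ _ _ (PySem.List.nodup_dedup _) (PySem.List.nodup_dedup _) (fun _ hk => hk)]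
  rw [show (PySem.Dict.mk ((PySem.List.dedup ((edgesOf g).map (fun q => q.1))).map
      (fun k => (k, if k ∈ PySem.List.dedup ((edgesOf g).map (fun q => q.1))
        then PySem.List.sorted (PySem.List.dedup (srcsOf k (edgesOf g))) (fun x => x) false
        else PySem.List.dedup (srcsOf k (edgesOf g)))))).items
      = (PySem.List.dedup ((edgesOf g).map (fun q => q.1))).map
      (fun k => (k, if k ∈ PySem.List.dedup ((edgesOf g).map (fun q => q.1))
        then PySem.List.sorted (PySem.List.dedup (srcsOf k (edgesOf g))) (fun x => x) false
        else PySem.List.dedup (srcsOf k (edgesOf g)))) from rfl]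
  rw [edges_map_fst]
  apply List.map_congr_left
  intro k hk
  rw [if_pos hk, dedup_srcs_eq]

-- ===== VERDICT (by name: the statement is the Claim_ definition above) =====
theorem build_reverse_dependency_map_spec : Claim_equal_build_reverse_dependency_map := by
  intro g _
  unfold Spec_build_reverse_dependency_map
  exact main_eq g
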